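-- pv_equiv track=rewrite | github.com/MightyMacu/Getraenkekasse | db_abfrage_getraenke_menge.py | umlautEncode
-- ===== SOURCE A (Python) =====
-- def umlautEncode(s):
--     encoded = ""
--     for c in s:
--         if c == ' ':
--             encoded += " "
--         elif c == '\xc3\xa3':
--             encoded += "ā"
--         elif c == ',':
--             encoded += ", "
--         elif c == '\xe2\x82\xac':
--             encoded += "€"
--         else:
--             encoded += c
--     return encoded
-- ===== SOURCE B (Python) =====
-- def umlautEncode(s):
--     # The multi-byte branches in A compare a single character against two/three
--     # character strings and can never match; the space branch is identity.
--     # The whole loop therefore just expands each ',' to ', '.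
--     return s.replace(',', ', ')
-- ===== Notes on version B (the rewrite author's own statement) =====
-- stated objective: simpler
-- what changed: Replaced the character-by-character accumulating loop (whose multi-byte umlaut/euro branches are dead code in Python 3 and whose space branch is identity) with a single built-in str.replace call expanding each comma.
import Mathlib
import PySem

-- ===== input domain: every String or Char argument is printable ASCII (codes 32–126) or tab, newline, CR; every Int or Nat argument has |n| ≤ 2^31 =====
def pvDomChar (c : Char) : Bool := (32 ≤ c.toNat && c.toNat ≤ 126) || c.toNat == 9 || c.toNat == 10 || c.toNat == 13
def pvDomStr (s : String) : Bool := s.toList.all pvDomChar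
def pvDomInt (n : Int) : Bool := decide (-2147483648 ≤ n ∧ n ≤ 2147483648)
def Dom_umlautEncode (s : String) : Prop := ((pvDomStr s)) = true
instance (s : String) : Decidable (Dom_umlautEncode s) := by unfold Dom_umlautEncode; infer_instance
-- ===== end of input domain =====

-- B replaces A's character-accumulating loop (with its unreachable multi-character
-- umlaut/euro branches and identity space branch) by one built-in replace of ',' with ', '.

-- ===== PORT A =====
-- the Python literals '\xc3\xa3' (two chars) and '\xe2\x82\xac' (three chars)
def umlautLit : String := String.ofList [Char.ofNat 0xC3, Char.ofNat 0xA3]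
def euroLit : String := String.ofList [Char.ofNat 0xE2, Char.ofNat 0x82, Char.ofNat 0xAC]

def umlautEncode (s : String) : String :=
  s.toList.foldl (fun encoded c =>
    if c == ' ' then encoded ++ " "
    else if String.ofList [c] == umlautLit then encoded ++ "ā"
    else if c == ',' then encoded ++ ", "
    else if String.ofList [c] == euroLit then encoded ++ "€"
    else encoded ++ String.ofList [c]) ""

-- ===== PORT B =====
def umlautEncode_alt (s : String) : String :=
  PySem.Str.replace s "," ", "

-- ===== PRECONDITION & SPEC =====
def Spec_umlautEncode (s : String) (out : String) : Prop := out = umlautEncode_alt s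
instance (s : String) (out : String) : Decidable (Spec_umlautEncode s out) := by unfold Spec_umlautEncode; infer_instance

-- ===== CLAIM (what is proved, stated in full; the proofs are below) =====
def Claim_equal_umlautEncode : Prop := ∀ (s : String), Dom_umlautEncode s → Spec_umlautEncode s (umlautEncode s)

-- ===== LEMMAS AND PROOFS =====

/-- The per-character expansion implemented by both programs. -/
def commaExpand (c : Char) : List Char := if c == ',' then [',', ' '] else [c]

theorem go_eq_flatMap (l acc : List Char) (fuel : Nat) (h : l.length ≤ fuel) :
    PySem.Chars.replace.go [','] [',', ' '] fuel l acc
      = acc.reverse ++ l.flatMap commaExpand := by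
  induction l generalizing fuel acc with
  | nil =>
    cases fuel <;> simp [PySem.Chars.replace.go]
  | cons c t ih =>
    cases fuel with
    | zero => simp at h
    | succ n =>
      simp only [PySem.Chars.replace.go]
      by_cases hc : c = ','
      · subst hc
        simp only [List.isPrefixOf, beq_self_eq_true, Bool.and_true, if_pos]
        show PySem.Chars.replace.go [','] [',', ' '] n t ([',', ' '].reverse ++ acc)
          = acc.reverse ++ List.flatMap commaExpand (',' :: t)
        rw [ih]
        · simp [commaExpand]
        · simpa using h
      · have hp : [','].isPrefixOf (c :: t) = false := by
          simp [List.isPrefixOf, Ne.symm hc]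
        rw [hp]
        simp only [Bool.false_eq_true, if_false]
        rw [ih]
        · simp [commaExpand, hc]
        · simpa using h

theorem alt_toList (s : String) :
    (umlautEncode_alt s).toList = s.toList.flatMap commaExpand := by
  unfold umlautEncode_alt
  rw [PySem.Str.toList_replace]
  show PySem.Chars.replace s.toList [','] [',', ' '] = _
  rw [PySem.Chars.replace]
  simp only [List.isEmpty_cons, Bool.false_eq_true, if_false]
  exact go_eq_flatMap _ _ _ le_rfl

theorem ofList_single_ne_umlaut (c : Char) : (String.ofList [c] == umlautLit) = false := by
  simp only [umlautLit, beq_eq_false_iff_ne, ne_eq, ← String.toList_inj, String.toList_ofList]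
  simp

theorem ofList_single_ne_euro (c : Char) : (String.ofList [c] == euroLit) = false := by
  simp only [euroLit, beq_eq_false_iff_ne, ne_eq, ← String.toList_inj, String.toList_ofList]
  simp

theorem foldl_eq (l : List Char) (a : String) :
    (l.foldl (fun encoded c =>
      if c == ' ' then encoded ++ " "
      else if String.ofList [c] == umlautLit then encoded ++ "ā"
      else if c == ',' then encoded ++ ", "
      else if String.ofList [c] == euroLit then encoded ++ "€"
      else encoded ++ String.ofList [c]) a).toList
      = a.toList ++ l.flatMap commaExpand := by
  induction l generalizing a with
  | nil => simp
  | cons c t ih =>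
    simp only [List.foldl_cons, List.flatMap_cons, ih]
    rw [ofList_single_ne_umlaut, ofList_single_ne_euro]
    by_cases hsp : c = ' '
    · subst hsp
      simp [commaExpand]
    · by_cases hc : c = ','
      · subst hc
        simp [commaExpand]
      · simp [hsp, hc, commaExpand]

-- ===== VERDICT (by name: the statement is the Claim_ definition above) =====
theorem umlautEncode_spec : Claim_equal_umlautEncode := by
  intro s _
  show umlautEncode s = umlautEncode_alt s
  rw [← String.toList_inj]
  unfold umlautEncode
  rw [foldl_eq, alt_toList]
  rfl
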